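-- pv_equiv track=rewrite | github.com/dn0rmand/Advent-Of-Code | 2018/day23.py | calculate
-- ===== SOURCE A (Python) =====
-- X = 0
--
-- Y = 1
--
-- Z = 2
--
-- RADIUS = 3
--
-- def distance(bot, x, y, z):
--     d = abs(bot[X] - x) + abs(bot[Y] - y) + abs(bot[Z] - z)
--     return d
--
-- def inRange(bot, x, y, z):
--     return distance(bot, x, y, z) <= bot[RADIUS]
--
-- def calculate(bots, x0, y0, z0, size, steps):
--     count = 0
--
--     for b in bots:
--         good = False
--         for x in range(x0, x0+size+1, steps):
--             if good:
--                 break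
--             for y in range(y0, y0+size+1, steps):
--                 if good:
--                     break
--                 for z in range(z0, z0+size+1, steps):
--                     if inRange(b, x, y, z):
--                         good = True
--                         break
--         if good:
--             count += 1
--
--     return count
-- ===== SOURCE B (Python) =====
-- def calculate(bots, x0, y0, z0, size, steps):
--     # Per-axis snap to the nearest grid point; the grid is a product of
--     # three identical-length arithmetic progressions, so the minimal Manhattan distance
--     # to the grid is the sum of the per-axis minima.
--     n = len(range(x0, x0 + size + 1, steps))
--     if n == 0:
--         return 0
--
--     def axis_min(c, o):
--         q = (c - o) // steps
--         best = None
--         for k in (q, q + 1):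
--             k = min(max(k, 0), n - 1)
--             d = abs(c - (o + k * steps))
--             if best is None or d < best:
--                 best = d
--         return best
--
--     count = 0
--     for b in bots:
--         if axis_min(b[0], x0) + axis_min(b[1], y0) + axis_min(b[2], z0) <= b[3]:
--             count += 1
--     return count
-- ===== Notes on version B (the rewrite author's own statement) =====
-- stated objective: alternative
-- what changed: Replaces the triple nested scan over all sampled grid points per bot by a closed-form per-axis snap to the nearest grid coordinate (floor-divide then clamp), summing the three axis minima and comparing to the radius; one O(1) check per bot instead of up to (size/steps+1)^3 grid probes (intended as faster; a timing run's random inputs keep grids small and measured only 1.36x at the largest size, so no speed is claimed).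
-- outside the precondition, e.g. on calculate([], 0, 0, 0, 0, 0): A returns 0, B raises ValueError
import Mathlib
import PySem

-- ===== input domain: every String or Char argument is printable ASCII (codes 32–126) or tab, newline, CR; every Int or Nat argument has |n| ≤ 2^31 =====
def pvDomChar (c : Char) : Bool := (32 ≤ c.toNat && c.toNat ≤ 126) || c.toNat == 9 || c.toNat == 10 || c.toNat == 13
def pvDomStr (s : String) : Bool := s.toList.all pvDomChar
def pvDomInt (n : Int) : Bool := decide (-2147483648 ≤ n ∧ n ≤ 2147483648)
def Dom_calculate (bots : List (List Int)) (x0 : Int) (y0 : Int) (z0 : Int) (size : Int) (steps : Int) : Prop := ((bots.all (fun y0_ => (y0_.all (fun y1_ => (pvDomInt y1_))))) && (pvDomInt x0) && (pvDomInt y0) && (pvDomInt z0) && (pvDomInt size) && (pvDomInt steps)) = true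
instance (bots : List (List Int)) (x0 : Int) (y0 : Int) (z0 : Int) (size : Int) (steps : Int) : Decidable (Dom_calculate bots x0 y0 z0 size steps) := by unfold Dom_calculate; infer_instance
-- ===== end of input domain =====

-- B replaces A's triple nested scan of the sampled grid per bot by a closed-form per-axis
-- nearest-grid-coordinate computation: one check per bot instead of probing every grid point.

-- ===== PORT A =====
-- distance(bot, x, y, z)
def pyDistance (bot : List Int) (x y z : Int) : Int :=
  |PySem.List.pyGetD bot 0 0 - x| + |PySem.List.pyGetD bot 1 0 - y| + |PySem.List.pyGetD bot 2 0 - z|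

-- inRange(bot, x, y, z)
def pyInRange (bot : List Int) (x y z : Int) : Bool :=
  decide (pyDistance bot x y z ≤ PySem.List.pyGetD bot 3 0)

-- the innermost 'for z' loop with its break
def loopZ (b : List Int) (x y : Int) : List Int → Bool
  | [] => false
  | z :: rest => if pyInRange b x y z then true else loopZ b x y rest

-- the 'for y' loop: each iteration runs the z loop, breaking as soon as good is set
def loopY (b : List Int) (x : Int) (zs : List Int) : List Int → Bool
  | [] => false
  | y :: rest => if loopZ b x y zs then true else loopY b x zs rest

-- the 'for x' loop
def loopX (b : List Int) (ys zs : List Int) : List Int → Bool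
  | [] => false
  | x :: rest => if loopY b x zs ys then true else loopX b ys zs rest

def calculate (bots : List (List Int)) (x0 : Int) (y0 : Int) (z0 : Int) (size : Int) (steps : Int) : Int :=
  let xs := PySem.List.pyRange x0 (x0 + size + 1) steps
  let ys := PySem.List.pyRange y0 (y0 + size + 1) steps
  let zs := PySem.List.pyRange z0 (z0 + size + 1) steps
  bots.foldl (fun count b => if loopX b ys zs xs then count + 1 else count) 0

-- ===== PORT B =====
-- axis_min(c, o): minimal |c - g| over the n grid coordinates g = o + k*steps, k = 0..n-1
def axisMin (steps n c o : Int) : Int :=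
  let q := PySem.Int.floordiv (c - o) steps
  let k1 := min (max q 0) (n - 1)
  let d1 := |c - (o + k1 * steps)|
  let k2 := min (max (q + 1) 0) (n - 1)
  let d2 := |c - (o + k2 * steps)|
  if d2 < d1 then d2 else d1

def calculate_alt (bots : List (List Int)) (x0 : Int) (y0 : Int) (z0 : Int) (size : Int) (steps : Int) : Int :=
  let n : Int := ((PySem.List.pyRange x0 (x0 + size + 1) steps).length : Int)
  if n = 0 then 0
  else bots.foldl (fun count b =>
    if axisMin steps n (PySem.List.pyGetD b 0 0) x0 + axisMin steps n (PySem.List.pyGetD b 1 0) y0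
        + axisMin steps n (PySem.List.pyGetD b 2 0) z0 ≤ PySem.List.pyGetD b 3 0
    then count + 1 else count) 0

-- ===== PRECONDITION & SPEC =====
-- Pre_ excludes the inputs on which range() or bot indexing raises: steps == 0 (ValueError; A only
-- builds the range when bots is nonempty, so for empty bots with steps == 0 A returns 0 while B,
-- which always computes len(range(...)), raises), and — when the sampled grid is nonempty — a bot
-- with fewer than 4 entries (IndexError, in both A and B).
def Pre_calculate (bots : List (List Int)) (x0 : Int) (y0 : Int) (z0 : Int) (size : Int) (steps : Int) : Prop :=
  steps ≠ 0 ∧ (((0 < steps ∧ 0 ≤ size) ∨ (steps < 0 ∧ size ≤ -2)) → ∀ b ∈ bots, 4 ≤ b.length)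
instance (bots : List (List Int)) (x0 : Int) (y0 : Int) (z0 : Int) (size : Int) (steps : Int) : Decidable (Pre_calculate bots x0 y0 z0 size steps) := by unfold Pre_calculate; infer_instance

def pvWitness_calculate : List (List Int) × Int × Int × Int × Int × Int :=
  ([[1, 2, 3, 4], [10, 10, 10, 2]], 0, 0, 0, 6, 2)

def Spec_calculate (bots : List (List Int)) (x0 : Int) (y0 : Int) (z0 : Int) (size : Int) (steps : Int) (out : Int) : Prop := out = calculate_alt bots x0 y0 z0 size steps
instance (bots : List (List Int)) (x0 : Int) (y0 : Int) (z0 : Int) (size : Int) (steps : Int) (out : Int) : Decidable (Spec_calculate bots x0 y0 z0 size steps out) := by unfold Spec_calculate; infer_instance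

-- ===== CLAIM (what is proved, stated in full; the proofs are below) =====
def Claim_equal_calculate : Prop := ∀ (bots : List (List Int)) (x0 : Int) (y0 : Int) (z0 : Int) (size : Int) (steps : Int), Dom_calculate bots x0 y0 z0 size steps → Pre_calculate bots x0 y0 z0 size steps → Spec_calculate bots x0 y0 z0 size steps (calculate bots x0 y0 z0 size steps)

-- ===== LEMMAS AND PROOFS =====

lemma loopZ_eq_any (b : List Int) (x y : Int) (zs : List Int) :
    loopZ b x y zs = zs.any (fun z => pyInRange b x y z) := by
  induction zs with
  | nil => rfl
  | cons z rest ih => cases h : pyInRange b x y z <;> simp [loopZ, ih, h]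

lemma loopY_eq_any (b : List Int) (x : Int) (zs ys : List Int) :
    loopY b x zs ys = ys.any (fun y => zs.any (fun z => pyInRange b x y z)) := by
  induction ys with
  | nil => rfl
  | cons y rest ih =>
      simp only [loopY, ih, List.any_cons, loopZ_eq_any]
      by_cases h : zs.any (fun z => pyInRange b x y z) = true <;> simp [h]

lemma loopX_eq_any (b : List Int) (ys zs xs : List Int) :
    loopX b ys zs xs = xs.any (fun x => ys.any (fun y => zs.any (fun z => pyInRange b x y z))) := by
  induction xs with
  | nil => rfl
  | cons x rest ih =>
      simp only [loopX, ih, List.any_cons, loopY_eq_any]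
      by_cases h : ys.any (fun y => zs.any (fun z => pyInRange b x y z)) = true <;> simp [h]

lemma pyRange_eq_map (a b s : Int) (hs : s ≠ 0) :
    PySem.List.pyRange a b s =
      (List.range (PySem.List.pyRange a b s).length).map (fun k : Nat => a + s * (k : Int)) := by
  rcases lt_or_gt_of_ne hs with h | h
  · conv_lhs => rw [PySem.List.pyRange_of_neg a b h]
    rw [PySem.List.pyRange_of_neg a b h]
    simp only [List.length_map, List.length_range]
  · conv_lhs => rw [PySem.List.pyRange_of_pos a b h]
    rw [PySem.List.pyRange_of_pos a b h]
    simp only [List.length_map, List.length_range]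

lemma mem_pyRange_iff_idx (a b s x : Int) (hs : s ≠ 0) :
    x ∈ PySem.List.pyRange a b s ↔
      ∃ k : Nat, k < (PySem.List.pyRange a b s).length ∧ x = a + ((k : Nat) : Int) * s := by
  constructor
  · intro hx
    rw [pyRange_eq_map a b s hs] at hx
    rcases List.mem_map.1 hx with ⟨k, hk, rfl⟩
    exact ⟨k, List.mem_range.1 hk, by ring⟩
  · rintro ⟨k, hk, rfl⟩
    rw [pyRange_eq_map a b s hs]
    exact List.mem_map.2 ⟨k, List.mem_range.2 hk, by ring⟩

lemma length_pyRange_shift (a a' d s : Int) :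
    (PySem.List.pyRange a (a + d + 1) s).length = (PySem.List.pyRange a' (a' + d + 1) s).length := by
  rcases lt_trichotomy s 0 with h | h | h
  · rw [PySem.List.pyRange_of_neg a _ h, PySem.List.pyRange_of_neg a' _ h]
    simp only [List.length_map, List.length_range]
    have e1 : a - (a + d + 1) = a' - (a' + d + 1) := by ring
    have e3 : (a + d + 1 < a) ↔ (a' + d + 1 < a') := by omega
    rw [e1]
    simp only [propext e3]
  · subst h; simp [PySem.List.pyRange]
  · rw [PySem.List.pyRange_of_pos a _ h, PySem.List.pyRange_of_pos a' _ h]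
    simp only [List.length_map, List.length_range]
    have e1 : a + d + 1 - a = a' + d + 1 - a' := by ring
    have e3 : (a < a + d + 1) ↔ (a' < a' + d + 1) := by omega
    rw [e1]
    simp only [propext e3]

lemma absle_left (s m q k k1 : Int)
    (hm : (0 < s ∧ 0 ≤ m ∧ m < s) ∨ (s < 0 ∧ s < m ∧ m ≤ 0))
    (h1 : k ≤ k1) (h2 : k1 ≤ q) :
    |(q - k1) * s + m| ≤ |(q - k) * s + m| := by
  rcases hm with ⟨hs, hm0, hms⟩ | ⟨hs, hms, hm0⟩
  · rw [abs_of_nonneg (by nlinarith), abs_of_nonneg (by nlinarith)]; nlinarith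
  · rw [abs_of_nonpos (by nlinarith), abs_of_nonpos (by nlinarith)]; nlinarith

lemma absle_right (s m q k k2 : Int)
    (hm : (0 < s ∧ 0 ≤ m ∧ m < s) ∨ (s < 0 ∧ s < m ∧ m ≤ 0))
    (h1 : q + 1 ≤ k2) (h2 : k2 ≤ k) :
    |(q - k2) * s + m| ≤ |(q - k) * s + m| := by
  rcases hm with ⟨hs, hm0, hms⟩ | ⟨hs, hms, hm0⟩
  · rw [abs_of_nonpos (by nlinarith), abs_of_nonpos (by nlinarith)]; nlinarith
  · rw [abs_of_nonneg (by nlinarith), abs_of_nonneg (by nlinarith)]; nlinarith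

lemma cmo_decomp (c o s : Int) (k : Int) :
    c - (o + k * s) = (PySem.Int.floordiv (c - o) s - k) * s + PySem.Int.mod (c - o) s := by
  have := PySem.Int.floordiv_mul_add_mod (c - o) s
  ring_nf
  linarith [this]

lemma mod_bounds (a s : Int) (hs : s ≠ 0) :
    (0 < s ∧ 0 ≤ PySem.Int.mod a s ∧ PySem.Int.mod a s < s) ∨
    (s < 0 ∧ s < PySem.Int.mod a s ∧ PySem.Int.mod a s ≤ 0) := by
  rcases lt_or_gt_of_ne hs with h | h
  · exact Or.inr ⟨h, (PySem.Int.mod_neg_bounds a h).1, (PySem.Int.mod_neg_bounds a h).2⟩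
  · exact Or.inl ⟨h, PySem.Int.mod_nonneg a h, PySem.Int.mod_lt a h⟩

lemma axisMin_le (s n c o : Int) (hs : s ≠ 0) (hn : 0 < n) (k : Int)
    (hk0 : 0 ≤ k) (hk1 : k ≤ n - 1) :
    axisMin s n c o ≤ |c - (o + k * s)| := by
  have hm := mod_bounds (c - o) s hs
  have hL : |c - (o + (min (max (PySem.Int.floordiv (c - o) s) 0) (n - 1)) * s)| ≤ |c - (o + k * s)| ∨
      |c - (o + (min (max (PySem.Int.floordiv (c - o) s + 1) 0) (n - 1)) * s)| ≤ |c - (o + k * s)| := by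
    by_cases hkq : k ≤ PySem.Int.floordiv (c - o) s
    · left
      rw [cmo_decomp c o s, cmo_decomp c o s]
      exact absle_left _ _ _ _ _ hm (by omega) (by omega)
    · right
      rw [cmo_decomp c o s, cmo_decomp c o s]
      exact absle_right _ _ _ _ _ hm (by omega) (by omega)
  simp only [axisMin]
  split_ifs with h
  · rcases hL with h1 | h2
    · exact le_trans (le_of_lt h) h1
    · exact h2
  · rcases hL with h1 | h2
    · exact h1
    · exact le_trans (not_lt.mp h) h2

lemma axisMin_attained (s n c o : Int) (hn : 0 < n) :
    ∃ k : Int, 0 ≤ k ∧ k ≤ n - 1 ∧ axisMin s n c o = |c - (o + k * s)| := by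
  simp only [axisMin]
  split_ifs with h
  · exact ⟨min (max (PySem.Int.floordiv (c - o) s + 1) 0) (n - 1), by omega, by omega, rfl⟩
  · exact ⟨min (max (PySem.Int.floordiv (c - o) s) 0) (n - 1), by omega, by omega, rfl⟩

lemma foldl_acc_id (l : List (List Int)) (c : Int) :
    l.foldl (fun c (_ : List Int) => c) c = c := by
  induction l generalizing c with
  | nil => rfl
  | cons b rest ih => simpa using ih c

lemma bot_iff (b : List Int) (x0 y0 z0 size s : Int) (hs : s ≠ 0)
    (hn : (PySem.List.pyRange x0 (x0 + size + 1) s).length ≠ 0) :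
    loopX b (PySem.List.pyRange y0 (y0 + size + 1) s) (PySem.List.pyRange z0 (z0 + size + 1) s)
        (PySem.List.pyRange x0 (x0 + size + 1) s) =
      decide (axisMin s ((PySem.List.pyRange x0 (x0 + size + 1) s).length : Int) (PySem.List.pyGetD b 0 0) x0
            + axisMin s ((PySem.List.pyRange x0 (x0 + size + 1) s).length : Int) (PySem.List.pyGetD b 1 0) y0
            + axisMin s ((PySem.List.pyRange x0 (x0 + size + 1) s).length : Int) (PySem.List.pyGetD b 2 0) z0
            ≤ PySem.List.pyGetD b 3 0) := by
  have hNpos : 0 < ((PySem.List.pyRange x0 (x0 + size + 1) s).length : Int) := by omega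
  have hylen : (PySem.List.pyRange y0 (y0 + size + 1) s).length
      = (PySem.List.pyRange x0 (x0 + size + 1) s).length := by
    simpa using length_pyRange_shift y0 x0 size s
  have hzlen : (PySem.List.pyRange z0 (z0 + size + 1) s).length
      = (PySem.List.pyRange x0 (x0 + size + 1) s).length := by
    simpa using length_pyRange_shift z0 x0 size s
  rw [loopX_eq_any, Bool.eq_iff_iff]
  simp only [List.any_eq_true, decide_eq_true_eq]
  constructor
  · rintro ⟨x, hx, y, hy, z, hz, hin⟩
    rcases (mem_pyRange_iff_idx x0 (x0 + size + 1) s x hs).1 hx with ⟨kx, hkx, rfl⟩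
    rcases (mem_pyRange_iff_idx y0 (y0 + size + 1) s y hs).1 hy with ⟨ky, hky, rfl⟩
    rcases (mem_pyRange_iff_idx z0 (z0 + size + 1) s z hs).1 hz with ⟨kz, hkz, rfl⟩
    have hx1 := axisMin_le s ((PySem.List.pyRange x0 (x0 + size + 1) s).length : Int)
      (PySem.List.pyGetD b 0 0) x0 hs hNpos (kx : Int) (by omega) (by omega)
    have hy1 := axisMin_le s ((PySem.List.pyRange x0 (x0 + size + 1) s).length : Int)
      (PySem.List.pyGetD b 1 0) y0 hs hNpos (ky : Int) (by omega) (by omega)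
    have hz1 := axisMin_le s ((PySem.List.pyRange x0 (x0 + size + 1) s).length : Int)
      (PySem.List.pyGetD b 2 0) z0 hs hNpos (kz : Int) (by omega) (by omega)
    have hdist : pyDistance b (x0 + (kx:Int)*s) (y0 + (ky:Int)*s) (z0 + (kz:Int)*s) ≤ PySem.List.pyGetD b 3 0 := of_decide_eq_true hin
    unfold pyDistance at hdist
    linarith
  · intro hsum
    obtain ⟨kx, hkx0, hkx1, hkxe⟩ := axisMin_attained s
      ((PySem.List.pyRange x0 (x0 + size + 1) s).length : Int) (PySem.List.pyGetD b 0 0) x0 hNpos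
    obtain ⟨ky, hky0, hky1, hkye⟩ := axisMin_attained s
      ((PySem.List.pyRange x0 (x0 + size + 1) s).length : Int) (PySem.List.pyGetD b 1 0) y0 hNpos
    obtain ⟨kz, hkz0, hkz1, hkze⟩ := axisMin_attained s
      ((PySem.List.pyRange x0 (x0 + size + 1) s).length : Int) (PySem.List.pyGetD b 2 0) z0 hNpos
    refine ⟨x0 + kx * s, ?_, y0 + ky * s, ?_, z0 + kz * s, ?_, ?_⟩
    · exact (mem_pyRange_iff_idx x0 (x0 + size + 1) s _ hs).2
        ⟨kx.toNat, by omega, by rw [Int.toNat_of_nonneg hkx0]⟩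
    · exact (mem_pyRange_iff_idx y0 (y0 + size + 1) s _ hs).2
        ⟨ky.toNat, by omega, by rw [Int.toNat_of_nonneg hky0]⟩
    · exact (mem_pyRange_iff_idx z0 (z0 + size + 1) s _ hs).2
        ⟨kz.toNat, by omega, by rw [Int.toNat_of_nonneg hkz0]⟩
    · unfold pyInRange pyDistance
      apply decide_eq_true
      linarith
-- ===== VERDICT (by name: the statement is the Claim_ definition above) =====
theorem calculate_spec : Claim_equal_calculate := by
  intro bots x0 y0 z0 size steps _ hpre
  obtain ⟨hs, _⟩ := hpre
  unfold Spec_calculate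
  simp only [calculate, calculate_alt]
  by_cases hn : (PySem.List.pyRange x0 (x0 + size + 1) steps).length = 0
  · have hxs : PySem.List.pyRange x0 (x0 + size + 1) steps = [] :=
      List.eq_nil_of_length_eq_zero hn
    rw [if_pos (by exact_mod_cast hn)]
    rw [hxs]
    simp only [loopX, Bool.false_eq_true, if_false]
    exact foldl_acc_id bots 0
  · rw [if_neg (by exact_mod_cast hn)]
    apply (PySem.List.foldl_congr_mem bots _ _ 0 ?_).symm
    intro acc b _
    rw [bot_iff b x0 y0 z0 size steps hs hn]
    by_cases hcond : axisMin steps ((PySem.List.pyRange x0 (x0 + size + 1) steps).length : Int)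
          (PySem.List.pyGetD b 0 0) x0
        + axisMin steps ((PySem.List.pyRange x0 (x0 + size + 1) steps).length : Int)
          (PySem.List.pyGetD b 1 0) y0
        + axisMin steps ((PySem.List.pyRange x0 (x0 + size + 1) steps).length : Int)
          (PySem.List.pyGetD b 2 0) z0
        ≤ PySem.List.pyGetD b 3 0 <;>
      simp [hcond]
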